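-- pv_equiv track=rewrite | github.com/JurTeuwen/6IICT_PROG4_oef | hfst_1/opdrachten/opdracht_9.py | punten_berekenen
-- ===== SOURCE A (Python) =====
-- def punten_berekenen(puntenlijst):
--     dict_puntenlijst = {}
--     for index,value in enumerate(puntenlijst):
--         for index1,value1 in enumerate(value):
--             dict_puntenlijst[value1] = index+1
--     dict_puntenlijst_2={}
--     for i in sorted(dict_puntenlijst):
--         dict_puntenlijst_2[i]=dict_puntenlijst[i]
--
--     return dict_puntenlijst_2
-- ===== SOURCE B (Python) =====
-- def punten_berekenen(puntenlijst):
--     keys = sorted({v for sub in puntenlijst for v in sub})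
--     sets = [set(sub) for sub in puntenlijst]
--     return {k: max(i + 1 for i, s in enumerate(sets) if k in s)
--             for k in keys}
-- ===== Notes on version B (the rewrite author's own statement) =====
-- stated objective: alternative
-- what changed: Instead of accumulating a last-write-wins dict with nested loops and then re-sorting its keys, B first computes the sorted set of all values and then, for each key independently, takes the largest index+1 of a sublist containing it (max over enumerate with a per-sublist set membership test).
import Mathlib
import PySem

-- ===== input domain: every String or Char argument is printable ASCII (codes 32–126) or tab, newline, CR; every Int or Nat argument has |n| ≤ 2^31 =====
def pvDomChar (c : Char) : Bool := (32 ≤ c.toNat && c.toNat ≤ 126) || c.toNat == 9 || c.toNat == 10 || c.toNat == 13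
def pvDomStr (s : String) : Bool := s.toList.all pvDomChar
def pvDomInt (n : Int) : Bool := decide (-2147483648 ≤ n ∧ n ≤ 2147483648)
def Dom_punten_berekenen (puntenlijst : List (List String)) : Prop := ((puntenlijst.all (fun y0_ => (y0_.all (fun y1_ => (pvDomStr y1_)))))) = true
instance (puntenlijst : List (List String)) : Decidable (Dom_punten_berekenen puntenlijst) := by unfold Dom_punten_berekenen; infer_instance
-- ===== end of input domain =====

-- B inverts the shape: instead of A's nested last-write-wins dict accumulation plus key sort,
-- it sorts the set of all values and, per key, takes the max sublist index (i+1) containing it.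


-- ===== PORT A =====
-- `dict_puntenlijst[i]` in A's second loop never raises (i ranges over the dict's own keys),
-- so `getD i 0` is exact there.
def punten_berekenen (puntenlijst : List (List String)) : List (String × Int) :=
  let dict_puntenlijst : PySem.Dict String Int :=
    (PySem.List.enumerate puntenlijst 0).foldl
      (fun d iv => (PySem.List.enumerate iv.2 0).foldl
        (fun d i1v1 => d.insert i1v1.2 (iv.1 + 1)) d)
      PySem.Dict.empty
  let dict_puntenlijst_2 : PySem.Dict String Int :=
    (PySem.List.sorted dict_puntenlijst.keys (fun x => x) false).foldl
      (fun d2 i => d2.insert i (dict_puntenlijst.getD i 0)) PySem.Dict.empty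
  dict_puntenlijst_2.items

-- ===== PORT B =====
-- Python's `max(...)` never sees an empty generator (each key comes from some sublist), so
-- `.getD 0` on that unreachable branch is exact; the dict comprehension runs over the
-- distinct sorted keys, so its association list is exactly this map.
def punten_berekenen_alt (puntenlijst : List (List String)) : List (String × Int) :=
  let keys : List String :=
    PySem.List.sorted (PySem.Set.ofList (puntenlijst.flatMap (fun sub => sub))) (fun x => x) false
  let sets : List (PySem.Set String) := puntenlijst.map (fun sub => PySem.Set.ofList sub)
  keys.map (fun k =>
    (k, (PySem.List.max?
          (((PySem.List.enumerate sets 0).filter (fun p => PySem.Set.contains p.2 k)).map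
            (fun p => (p.1 + 1 : Int)))
          (fun y => y)).getD 0))

-- ===== PRECONDITION & SPEC =====
def Spec_punten_berekenen (puntenlijst : List (List String)) (out : List (String × Int)) : Prop := out = punten_berekenen_alt puntenlijst
instance (puntenlijst : List (List String)) (out : List (String × Int)) : Decidable (Spec_punten_berekenen puntenlijst out) := by unfold Spec_punten_berekenen; infer_instance

-- ===== CLAIM (what is proved, stated in full; the proofs are below) =====
def Claim_equal_punten_berekenen : Prop := ∀ (puntenlijst : List (List String)), Dom_punten_berekenen puntenlijst → Spec_punten_berekenen puntenlijst (punten_berekenen puntenlijst)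

-- ===== LEMMAS AND PROOFS =====

-- proof-only helper: the (index+1) of the LAST sublist (from position s on) containing k
def pvLastHit (k : String) : List (List String) → Int → Option Int
  | [], _ => none
  | sub :: rest, s =>
    match pvLastHit k rest (s + 1) with
    | some v => some v
    | none => if sub.contains k then some (s + 1) else none

-- lookup in an insert-fold = last pair with that key
theorem pv_getD_foldl_ins (l : List (String × Int)) (d : PySem.Dict String Int) (k : String) (z : Int) :
    ((l.foldl (fun d p => d.insert p.1 p.2) d).getD k z) =
      (l.filter (fun p => decide (p.1 = k))).foldl (fun _ p => p.2) (d.getD k z) := by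
  induction l generalizing d with
  | nil => simp
  | cons x l ih =>
    rw [List.foldl_cons, ih, List.filter_cons]
    by_cases hc : x.1 = k
    · simp [hc]
    · simp [hc, PySem.Dict.getD_insert_of_ne _ _ _ (Ne.symm hc)]

theorem pv_update_nil {α : Type} [BEq α] (xs : List α) :
    PySem.Set.update ([] : PySem.Set α) xs = PySem.Set.ofList xs := by
  rw [PySem.Set.ofList_eq_foldl]; rfl

-- A's nested enumerate loop builds the same dict as folding inserts over the flat pair list
theorem pv_enum_inner (sub : List String) (c : Int) (s : Int) (d : PySem.Dict String Int) :
    (PySem.List.enumerate sub s).foldl (fun d q => d.insert q.2 c) d =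
      (sub.map (fun v => (v, c))).foldl (fun d p => d.insert p.1 p.2) d := by
  induction sub generalizing s d with
  | nil => rfl
  | cons v t ih => simpa [PySem.List.enumerate] using ih (s + 1) (d.insert v c)

theorem pv_flatten (puntenlijst : List (List String)) :
    ((PySem.List.enumerate puntenlijst 0).foldl
      (fun d iv => (PySem.List.enumerate iv.2 0).foldl
        (fun d i1v1 => d.insert i1v1.2 (iv.1 + 1)) d)
      PySem.Dict.empty : PySem.Dict String Int) =
    ((PySem.List.enumerate puntenlijst 0).flatMap
      (fun isub => isub.2.map (fun v => (v, isub.1 + 1)))).foldl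
      (fun d p => d.insert p.1 p.2) PySem.Dict.empty := by
  rw [List.foldl_flatMap]
  congr 1
  funext d iv
  exact pv_enum_inner iv.2 (iv.1 + 1) 0 d

-- the keys of the flat pair list are exactly the flattened values
theorem pv_pairs_fst (pl : List (List String)) (s : Int) :
    ((PySem.List.enumerate pl s).flatMap
      (fun isub => isub.2.map (fun v => (v, isub.1 + 1)))).map Prod.fst =
      pl.flatMap (fun sub => sub) := by
  induction pl generalizing s with
  | nil => simp [PySem.List.enumerate]
  | cons sub rest ih =>
    simp only [PySem.List.enumerate, List.flatMap_cons, List.map_append, List.map_map]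
    rw [ih (s + 1)]
    congr 1
    induction sub with
    | nil => rfl
    | cons v t iht => simp [iht]

-- folding "last value" over one block of equal-index pairs
theorem pv_block (k : String) (sub : List String) (c z : Int) :
    ((sub.map (fun v => (v, c))).filter (fun p => decide (p.1 = k))).foldl
      (fun _ p => p.2) z = if sub.contains k then c else z := by
  induction sub generalizing z with
  | nil => simp
  | cons v t ih =>
    by_cases hv : v = k
    · simp [hv, ih]
    · have hk : ¬ k = v := fun h => hv h.symm
      simp [hv, hk, ih]

-- A-side characterisation: last write for key k = pvLastHit
theorem pv_L1 (k : String) (pl : List (List String)) (s z : Int) :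
    (((PySem.List.enumerate pl s).flatMap
      (fun isub => isub.2.map (fun v => (v, isub.1 + 1)))).filter
        (fun p => decide (p.1 = k))).foldl (fun _ p => p.2) z =
      (pvLastHit k pl s).getD z := by
  induction pl generalizing s z with
  | nil => simp [PySem.List.enumerate, pvLastHit]
  | cons sub rest ih =>
    simp only [PySem.List.enumerate, List.flatMap_cons, List.filter_append, List.foldl_append]
    rw [pv_block, ih (s + 1)]
    cases h : pvLastHit k rest (s + 1) with
    | some v => simp [pvLastHit, h]
    | none => by_cases hc : k ∈ sub <;> simp [pvLastHit, h, hc]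

-- every candidate index+1 from position s on is at least s+1
theorem pv_M_bound (k : String) (pl : List (List String)) (s x : Int)
    (hx : x ∈ ((PySem.List.enumerate pl s).filter (fun p => p.2.contains k)).map
      (fun p => (p.1 + 1 : Int))) : s + 1 ≤ x := by
  induction pl generalizing s with
  | nil => simp [PySem.List.enumerate] at hx
  | cons sub rest ih =>
    simp only [PySem.List.enumerate, List.filter_cons] at hx
    by_cases hc : sub.contains k
    · simp only [hc, if_true, List.map_cons, List.mem_cons] at hx
      rcases hx with h | h
      · omega
      · have := ih (s + 1) h; omega
    · simp only [hc, Bool.false_eq_true, if_false] at hx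
      have := ih (s + 1) hx; omega

-- first-extremal max of a cons whose head is a lower bound of the tail
theorem pv_max_cons (x : Int) (t : List Int) (h : ∀ y ∈ t, x ≤ y) :
    PySem.List.max? (x :: t) (fun y => y) =
      some ((PySem.List.max? t (fun y => y)).getD x) := by
  cases t with
  | nil => simp [PySem.List.max?]
  | cons y t' =>
    rw [PySem.List.max?_id_cons, PySem.List.max?_id_cons]
    simp [List.foldl_cons, max_eq_right (h y (by simp))]

-- B-side characterisation: max candidate index+1 = pvLastHit
theorem pv_L2 (k : String) (pl : List (List String)) (s : Int) :
    PySem.List.max?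
      (((PySem.List.enumerate pl s).filter (fun p => p.2.contains k)).map
        (fun p => (p.1 + 1 : Int))) (fun y => y) = pvLastHit k pl s := by
  induction pl generalizing s with
  | nil => simp [PySem.List.enumerate, pvLastHit, PySem.List.max?]
  | cons sub rest ih =>
    simp only [PySem.List.enumerate, List.filter_cons]
    by_cases hc : sub.contains k
    · rw [if_pos hc, List.map_cons,
        pv_max_cons _ _ (fun y hy => le_trans (by omega) (pv_M_bound k rest (s + 1) y hy)),
        ih (s + 1)]
      cases h : pvLastHit k rest (s + 1) with
      | some v => simp [pvLastHit, h]
      | none => simp [pvLastHit, h]; simpa using hc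
    · rw [if_neg hc, ih (s + 1)]
      cases h : pvLastHit k rest (s + 1) with
      | some v => simp [pvLastHit, h]
      | none => simp [pvLastHit, h]; simpa using hc

-- enumerate over a mapped list
theorem pv_enum_map {α β : Type} (f : α → β) (l : List α) (s : Int) :
    PySem.List.enumerate (l.map f) s =
      (PySem.List.enumerate l s).map (fun p => (p.1, f p.2)) := by
  induction l generalizing s with
  | nil => rfl
  | cons x t ih => simp [PySem.List.enumerate, ih (s + 1)]

-- membership in set(sub) = membership in sub
theorem pv_contains_ofList (sub : List String) (k : String) :
    PySem.Set.contains (PySem.Set.ofList sub) k = sub.contains k := by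
  simp only [PySem.Set.contains]
  by_cases h : k ∈ sub <;>
    simp [h, PySem.Set.mem_ofList]

-- the candidate indices are unchanged by replacing each sublist with its set
theorem pv_sets_candidates (pl : List (List String)) (k : String) (s : Int) :
    ((PySem.List.enumerate (pl.map (fun sub => PySem.Set.ofList sub)) s).filter
        (fun p => PySem.Set.contains p.2 k)).map (fun p => (p.1 + 1 : Int)) =
      ((PySem.List.enumerate pl s).filter (fun p => p.2.contains k)).map
        (fun p => (p.1 + 1 : Int)) := by
  rw [pv_enum_map, List.filter_map, List.map_map]
  congr 1
  apply List.filter_congr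
  intro p _
  exact pv_contains_ofList p.2 k

-- ===== VERDICT (by name: the statement is the Claim_ definition above) =====
theorem punten_berekenen_spec : Claim_equal_punten_berekenen := by
  intro pl _
  unfold Spec_punten_berekenen punten_berekenen punten_berekenen_alt
  set pairs : List (String × Int) :=
    (PySem.List.enumerate pl 0).flatMap
      (fun isub => isub.2.map (fun v => (v, isub.1 + 1))) with hpairs
  set d1 : PySem.Dict String Int :=
    (PySem.List.enumerate pl 0).foldl
      (fun d iv => (PySem.List.enumerate iv.2 0).foldl
        (fun d i1v1 => d.insert i1v1.2 (iv.1 + 1)) d)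
      PySem.Dict.empty with hd1
  have h5 : d1 = pairs.foldl (fun d p => d.insert p.1 p.2) PySem.Dict.empty :=
    pv_flatten pl
  have hkeysA : d1.keys = PySem.Set.ofList (pairs.map Prod.fst) := by
    rw [h5, PySem.Dict.keys_foldl_insert_key pairs Prod.fst (fun _ p => p.2) PySem.Dict.empty,
      PySem.Dict.keys_empty, pv_update_nil]
  have hnodA : d1.keys.Nodup := by rw [hkeysA]; exact PySem.Set.nodup_ofList _
  -- the two sorted key lists are sorts of the same list
  have hkeyseq : PySem.List.sorted d1.keys (fun x => x) false =
      PySem.List.sorted (PySem.Set.ofList (pl.flatMap (fun sub => sub))) (fun x => x) false := by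
    rw [hkeysA, hpairs, pv_pairs_fst pl 0]
  -- A's result as a map over its sorted keys
  have hitemsA :
      ((PySem.List.sorted d1.keys (fun x => x) false).foldl
        (fun d2 i => d2.insert i (d1.getD i 0)) PySem.Dict.empty).items =
      (PySem.List.sorted d1.keys (fun x => x) false).map (fun k => (k, d1.getD k 0)) := by
    rw [PySem.Dict.items_foldl_insert_fresh (PySem.List.sorted d1.keys (fun x => x) false)
      (fun i => i) (fun i => d1.getD i 0) PySem.Dict.empty
      (fun a _ => PySem.Dict.contains_empty a)
      (by simpa [List.map_id'] using
        ((PySem.List.sorted_perm d1.keys (fun x => x) false).nodup_iff.mpr hnodA))]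
    simp [PySem.Dict.empty]
  -- pointwise: A's stored value = B's max candidate, for EVERY key
  have hvals : ∀ k, d1.getD k 0 =
      (PySem.List.max?
        (((PySem.List.enumerate (pl.map (fun sub => PySem.Set.ofList sub)) 0).filter
          (fun p => PySem.Set.contains p.2 k)).map
          (fun p => (p.1 + 1 : Int))) (fun y => y)).getD 0 := by
    intro k
    rw [pv_sets_candidates pl k 0, h5, pv_getD_foldl_ins, PySem.Dict.getD_empty, hpairs,
      pv_L1 k pl 0 0, pv_L2 k pl 0]
  rw [hitemsA, hkeyseq]
  exact List.map_congr_left (fun k _ => by rw [hvals k])
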